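-- pv_equiv track=rewrite | github.com/kguinternational/hologram-archive | working/exceptional_groups/f4/weyl_atlas_embedding.py | _preserves_adjacency
-- ===== SOURCE A (Python) =====
-- from typing import List, Dict, Set, Tuple
--
-- def _preserves_adjacency(perm: Tuple[int, ...], adj_matrix: List[List[bool]]) -> bool:
--     """Check if permutation preserves adjacency structure."""
--     n = len(perm)
--
--     # Quick check: permutation must be bijection
--     if len(set(perm)) != n or any(p >= n or p < 0 for p in perm):
--         return False
--
--     # Check adjacency preservation
--     for i in range(n):
--         for j in range(n):
--             # Original adjacency
--             adj_original = adj_matrix[i][j]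
--
--             # Permuted adjacency
--             pi = perm[i]
--             pj = perm[j]
--             adj_permuted = adj_matrix[pi][pj]
--
--             if adj_original != adj_permuted:
--                 return False
--
--     return True
-- ===== SOURCE B (Python) =====
-- from typing import List, Tuple
--
-- def _preserves_adjacency(perm: Tuple[int, ...], adj_matrix: List[List[bool]]) -> bool:
--     """Check if permutation preserves adjacency structure (edge-set formulation)."""
--     n = len(perm)
--
--     # Bijection guard: perm must be exactly a rearrangement of 0..n-1.
--     if sorted(perm) != list(range(n)):
--         return False
--
--     # Collect the edge set in one pass over the matrix.
--     edges = {(i, j) for i in range(n) for j in range(n) if adj_matrix[i][j]}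
--
--     # perm induces a bijection on index pairs, so mapping the (finite) edge
--     # set into itself is equivalent to full adjacency equality.
--     return all((perm[i], perm[j]) in edges for (i, j) in edges)
-- ===== Notes on version B (the rewrite author's own statement) =====
-- stated objective: alternative
-- what changed: Replaces A's set/any bijection guard with a sorted(perm)==range(n) check and A's all-pairs adjacency-equality scan with building the edge set once and checking only forward closure of edges under the permutation, which suffices because a bijection maps the finite edge set into itself iff onto itself.
import Mathlib
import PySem

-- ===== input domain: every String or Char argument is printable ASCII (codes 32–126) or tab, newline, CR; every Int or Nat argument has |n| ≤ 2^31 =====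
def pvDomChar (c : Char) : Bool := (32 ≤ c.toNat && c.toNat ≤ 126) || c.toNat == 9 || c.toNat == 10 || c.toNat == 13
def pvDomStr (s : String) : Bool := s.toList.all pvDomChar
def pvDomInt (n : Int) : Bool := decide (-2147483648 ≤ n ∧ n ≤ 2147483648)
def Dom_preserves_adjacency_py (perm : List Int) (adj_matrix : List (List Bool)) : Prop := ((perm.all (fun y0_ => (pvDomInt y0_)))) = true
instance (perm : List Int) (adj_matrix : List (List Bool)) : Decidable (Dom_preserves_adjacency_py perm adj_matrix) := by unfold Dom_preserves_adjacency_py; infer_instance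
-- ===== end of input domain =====

-- B replaces A's set/any bijection guard by sorted(perm)==range(n) and A's all-pairs
-- adjacency-equality scan by building the edge set once and checking only that the
-- permutation maps it into itself (enough, since the induced pair map is a bijection);
-- same O(n^2) cost, alternative algorithm.

-- ===== PORT A =====
def preserves_adjacency_py (perm : List Int) (adj_matrix : List (List Bool)) : Bool :=
  let n : Int := (perm.length : Int)
  if (PySem.Set.len (PySem.Set.ofList perm) != n)
      || perm.any (fun p => decide (n ≤ p) || decide (p < 0)) then
    false
  else
    -- pyGetD is exact here: Pre_ excludes the inputs where Python's indexing raises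
    (PySem.List.pyRange 0 n 1).all (fun i =>
      (PySem.List.pyRange 0 n 1).all (fun j =>
        let adj_original := PySem.List.pyGetD (PySem.List.pyGetD adj_matrix i []) j false
        let pi := PySem.List.pyGetD perm i 0
        let pj := PySem.List.pyGetD perm j 0
        let adj_permuted := PySem.List.pyGetD (PySem.List.pyGetD adj_matrix pi []) pj false
        adj_original == adj_permuted))

-- ===== PORT B =====
def preserves_adjacency_py_alt (perm : List Int) (adj_matrix : List (List Bool)) : Bool :=
  let n : Int := (perm.length : Int)
  if PySem.List.sorted perm (fun x => x) false ≠ PySem.List.pyRange 0 n 1 then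
    false
  else
    let edges : PySem.Set (Int × Int) :=
      PySem.Set.ofList ((PySem.List.pyRange 0 n 1).flatMap (fun i =>
        ((PySem.List.pyRange 0 n 1).filter (fun j =>
          PySem.List.pyGetD (PySem.List.pyGetD adj_matrix i []) j false)).map (fun j => (i, j))))
    edges.all (fun e =>
      PySem.Set.contains edges (PySem.List.pyGetD perm e.1 0, PySem.List.pyGetD perm e.2 0))

-- ===== PRECONDITION & SPEC =====
-- Pre_ excludes exactly the inputs on which Python A raises IndexError: perm passes the
-- bijection guard but adj_matrix is smaller than n×n (fewer than n rows, or a used row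
-- shorter than n). A returns on every other input.
def Pre_preserves_adjacency_py (perm : List Int) (adj_matrix : List (List Bool)) : Prop :=
  (perm.Nodup ∧ ∀ p ∈ perm, 0 ≤ p ∧ p < (perm.length : Int)) →
    (perm.length ≤ adj_matrix.length ∧
      ∀ row ∈ adj_matrix.take perm.length, perm.length ≤ row.length)
instance (perm : List Int) (adj_matrix : List (List Bool)) : Decidable (Pre_preserves_adjacency_py perm adj_matrix) := by unfold Pre_preserves_adjacency_py; infer_instance

def pvWitness_preserves_adjacency_py : List Int × List (List Bool) :=
  ([0, 1], [[true, false], [false, true]])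

def Spec_preserves_adjacency_py (perm : List Int) (adj_matrix : List (List Bool)) (out : Bool) : Prop := out = preserves_adjacency_py_alt perm adj_matrix
instance (perm : List Int) (adj_matrix : List (List Bool)) (out : Bool) : Decidable (Spec_preserves_adjacency_py perm adj_matrix out) := by unfold Spec_preserves_adjacency_py; infer_instance

-- ===== CLAIM (what is proved, stated in full; the proofs are below) =====
def Claim_equal_preserves_adjacency_py : Prop := ∀ (perm : List Int) (adj_matrix : List (List Bool)), Dom_preserves_adjacency_py perm adj_matrix → Pre_preserves_adjacency_py perm adj_matrix → Spec_preserves_adjacency_py perm adj_matrix (preserves_adjacency_py perm adj_matrix)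

-- ===== LEMMAS AND PROOFS =====

-- adjacency lookup and the index map used in the proofs
def pvG (adj : List (List Bool)) (i j : Nat) : Bool := (adj.getD i []).getD j false
def pvPm (perm : List Int) (i : Nat) : Nat := (perm.getD i 0).toNat

-- equal length of set(perm) and perm means perm has no duplicates
lemma nodup_of_ofList_length (xs : List Int)
    (h : (PySem.Set.ofList xs).length = xs.length) : xs.Nodup := by
  have h1 : (PySem.Set.ofList xs).toFinset = xs.toFinset := by
    ext y; simp [PySem.Set.mem_ofList]
  have h2 : (PySem.Set.ofList xs).toFinset.card = (PySem.Set.ofList xs).length :=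
    List.toFinset_card_of_nodup (PySem.Set.nodup_ofList xs)
  have h3 : xs.toFinset.card = xs.dedup.length := List.card_toFinset xs
  have h4 : xs.dedup = xs :=
    List.Sublist.eq_of_length (List.dedup_sublist xs) (by rw [← h3, ← h1, h2, h])
  rw [← h4]; exact List.nodup_dedup xs

lemma ofList_length_of_nodup (xs : List Int) (h : xs.Nodup) :
    (PySem.Set.ofList xs).length = xs.length := by
  have h1 : (PySem.Set.ofList xs).toFinset = xs.toFinset := by
    ext y; simp [PySem.Set.mem_ofList]
  have h2 : (PySem.Set.ofList xs).toFinset.card = (PySem.Set.ofList xs).length :=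
    List.toFinset_card_of_nodup (PySem.Set.nodup_ofList xs)
  have h3 : xs.toFinset.card = xs.length := List.toFinset_card_of_nodup h
  rw [← h2, h1, h3]

lemma pyRange_pairwise_lt (n : Nat) :
    (PySem.List.pyRange 0 ((n : Nat) : Int) 1).Pairwise (· < ·) := by
  rw [PySem.List.pyRange_zero_natCast]
  exact (List.pairwise_map.mpr ((List.pairwise_lt_range (n := n)).imp
    (fun h => by exact_mod_cast h)))

-- the two guards reject exactly the same inputs
lemma guard_iff (perm : List Int) :
    (((PySem.Set.len (PySem.Set.ofList perm) != ((perm.length : Nat) : Int))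
      || perm.any (fun p => decide (((perm.length : Nat) : Int) ≤ p) || decide (p < 0))) = false)
    ↔ PySem.List.sorted perm (fun x => x) false
        = PySem.List.pyRange 0 ((perm.length : Nat) : Int) 1 := by
  constructor
  · intro h
    rw [Bool.or_eq_false_iff] at h
    obtain ⟨hg1, hg2⟩ := h
    rw [bne_eq_false_iff_eq] at hg1
    have hlen : (PySem.Set.ofList perm).length = perm.length := by
      simp only [PySem.Set.len, Nat.cast_inj] at hg1
      exact_mod_cast hg1
    have nodup : perm.Nodup := nodup_of_ofList_length perm hlen
    have hsub : perm ⊆ PySem.List.pyRange 0 ((perm.length : Nat) : Int) 1 := by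
      intro p hp
      have hb := List.any_eq_false.mp hg2 p hp
      simp only [Bool.or_eq_true, decide_eq_true_eq, not_or] at hb
      obtain ⟨hlt, hge⟩ := hb
      rw [not_le] at hlt; rw [not_lt] at hge
      rw [PySem.List.pyRange_zero_natCast]
      refine List.mem_map.mpr ⟨p.toNat, List.mem_range.mpr ?_, Int.toNat_of_nonneg hge⟩
      omega
    have hperm : perm.Perm (PySem.List.pyRange 0 ((perm.length : Nat) : Int) 1) := by
      refine (List.subperm_of_subset nodup hsub).perm_of_length_le ?_
      rw [PySem.List.pyRange_zero_natCast, List.length_map, List.length_range]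
    exact PySem.List.sorted_eq_of_perm_of_pairwise_lt perm _ (fun x => x)
      hperm.symm (pyRange_pairwise_lt _)
  · intro h
    have hperm : (PySem.List.pyRange 0 ((perm.length : Nat) : Int) 1).Perm perm := by
      rw [← h]; exact PySem.List.sorted_perm perm (fun x => x) false
    have nodup : perm.Nodup :=
      hperm.nodup (List.Pairwise.imp (fun hlt => ne_of_lt hlt) (pyRange_pairwise_lt _))
    have hmem : ∀ p ∈ perm, 0 ≤ p ∧ p < (perm.length : Int) := by
      intro p hp
      have : p ∈ PySem.List.pyRange 0 ((perm.length : Nat) : Int) 1 := hperm.mem_iff.mpr hp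
      rw [PySem.List.pyRange_zero_natCast] at this
      obtain ⟨k, hk, rfl⟩ := List.mem_map.mp this
      have := List.mem_range.mp hk
      constructor <;> [exact Int.natCast_nonneg k; exact_mod_cast this]
    rw [Bool.or_eq_false_iff, bne_eq_false_iff_eq]
    refine ⟨?_, List.any_eq_false.mpr fun p hp => by
      simp only [Bool.or_eq_true, decide_eq_true_eq, not_or, not_le, not_lt]
      exact ⟨(hmem p hp).2, (hmem p hp).1⟩⟩
    simp only [PySem.Set.len, Nat.cast_inj]
    exact_mod_cast ofList_length_of_nodup perm nodup

lemma all_pyRange_iff (n : Nat) (f : Int → Bool) :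
    ((PySem.List.pyRange 0 (n : Int) 1).all f = true) ↔ ∀ i, i < n → f (↑i) = true := by
  rw [PySem.List.pyRange_zero_natCast, List.all_map, List.all_eq_true]
  constructor
  · intro h i hi; exact h i (List.mem_range.mpr hi)
  · intro h x hx; exact h x (List.mem_range.mp hx)

-- the finite-bijection core: forward closure of g under an injective self-map of [0,n)
-- is equivalent to full invariance of g
lemma closure_iff (n : Nat) (g : Nat → Nat → Bool) (pm : Nat → Nat)
    (hlt : ∀ i, i < n → pm i < n)
    (hinj : ∀ i, i < n → ∀ j, j < n → pm i = pm j → i = j) :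
    ((∀ i, i < n → ∀ j, j < n → g i j = true → g (pm i) (pm j) = true) ↔
     (∀ i, i < n → ∀ j, j < n → g i j = g (pm i) (pm j))) := by
  constructor
  · intro hfwd
    let F : Fin n × Fin n → Fin n × Fin n :=
      fun x => (⟨pm x.1.1, hlt _ x.1.2⟩, ⟨pm x.2.1, hlt _ x.2.2⟩)
    have hF : Function.Injective F := by
      intro x y hxy
      have e1 : pm x.1.1 = pm y.1.1 := congrArg (fun z : Fin n × Fin n => z.1.1) hxy
      have e2 : pm x.2.1 = pm y.2.1 := congrArg (fun z : Fin n × Fin n => z.2.1) hxy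
      exact Prod.ext (Fin.ext (hinj _ x.1.2 _ y.1.2 e1)) (Fin.ext (hinj _ x.2.2 _ y.2.2 e2))
    let S : Finset (Fin n × Fin n) := Finset.univ.filter (fun x => g x.1.1 x.2.1 = true)
    have hsub : Finset.image F S ⊆ S := by
      intro y hy
      rcases Finset.mem_image.mp hy with ⟨x, hxS, rfl⟩
      rcases Finset.mem_filter.mp hxS with ⟨-, hgx⟩
      exact Finset.mem_filter.mpr ⟨Finset.mem_univ _, hfwd _ x.1.2 _ x.2.2 hgx⟩
    have hcard : S.card ≤ (Finset.image F S).card := by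
      rw [Finset.card_image_of_injective S hF]
    have heq : Finset.image F S = S := Finset.eq_of_subset_of_card_le hsub hcard
    intro i hi j hj
    by_cases hg1 : g i j = true
    · rw [hg1, hfwd i hi j hj hg1]
    · by_cases hg2 : g (pm i) (pm j) = true
      · exfalso
        have hyS : ((⟨pm i, hlt i hi⟩ : Fin n), (⟨pm j, hlt j hj⟩ : Fin n)) ∈ S :=
          Finset.mem_filter.mpr ⟨Finset.mem_univ _, hg2⟩
        rw [← heq] at hyS
        rcases Finset.mem_image.mp hyS with ⟨x, hxS, hFx⟩
        have e1 : pm x.1.1 = pm i := congrArg (fun z : Fin n × Fin n => z.1.1) hFx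
        have e2 : pm x.2.1 = pm j := congrArg (fun z : Fin n × Fin n => z.2.1) hFx
        rcases Finset.mem_filter.mp hxS with ⟨-, hgx⟩
        rw [hinj _ x.1.2 _ hi e1, hinj _ x.2.2 _ hj e2] at hgx
        exact hg1 hgx
      · rw [Bool.not_eq_true] at hg1 hg2; rw [hg1, hg2]
  · intro h i hi j hj hg; rw [← h i hi j hj]; exact hg

lemma set_all_closed_iff (L : List (Int × Int)) (f : Int × Int → Int × Int) :
    ((PySem.Set.ofList L).all (fun e => PySem.Set.contains (PySem.Set.ofList L) (f e)) = true) ↔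
      ∀ e ∈ L, f e ∈ L := by
  rw [List.all_eq_true]
  constructor
  · intro h e he
    have h1 := h e ((PySem.Set.mem_ofList _ _).mpr he)
    have h2 : f e ∈ PySem.Set.ofList L := by simpa [PySem.Set.contains] using h1
    exact (PySem.Set.mem_ofList _ _).mp h2
  · intro h e he
    have he' := (PySem.Set.mem_ofList _ _).mp he
    have h2 : f e ∈ PySem.Set.ofList L := (PySem.Set.mem_ofList _ _).mpr (h e he')
    simpa [PySem.Set.contains] using h2

lemma main_eq (perm : List Int) (adj_matrix : List (List Bool)) :
    preserves_adjacency_py perm adj_matrix = preserves_adjacency_py_alt perm adj_matrix := by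
  by_cases hguard : ((PySem.Set.len (PySem.Set.ofList perm) != ((perm.length : Nat) : Int))
      || perm.any (fun p => decide (((perm.length : Nat) : Int) ≤ p) || decide (p < 0))) = true
  · have hne : PySem.List.sorted perm (fun x => x) false
        ≠ PySem.List.pyRange 0 ((perm.length : Nat) : Int) 1 := by
      intro he
      have hf := (guard_iff perm).mpr he
      rw [hf] at hguard
      exact Bool.false_ne_true hguard
    simp only [preserves_adjacency_py, preserves_adjacency_py_alt]
    rw [if_pos hguard, if_pos hne]
  · have heqs : PySem.List.sorted perm (fun x => x) false
        = PySem.List.pyRange 0 ((perm.length : Nat) : Int) 1 :=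
      (guard_iff perm).mp (Bool.not_eq_true _ ▸ hguard)
    have hguard' := hguard
    simp only [Bool.or_eq_true, not_or, bne_iff_ne, ne_eq, not_not, List.any_eq_true,
      not_exists, Bool.or_eq_true, decide_eq_true_eq] at hguard'
    obtain ⟨hg1, hg2⟩ := hguard'
    have hlen : (PySem.Set.ofList perm).length = perm.length := by
      have := hg1
      simp only [PySem.Set.len, Nat.cast_inj] at this
      exact_mod_cast this
    have hr : ∀ p ∈ perm, 0 ≤ p ∧ p < (perm.length : Int) := by
      intro p hp
      have := hg2 p
      push Not at this
      obtain ⟨h1, h2⟩ := this hp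
      omega
    have nodup : perm.Nodup := nodup_of_ofList_length perm hlen
    have hmem : ∀ i, i < perm.length → perm.getD i 0 ∈ perm := by
      intro i hi
      rw [List.getD_eq_getElem perm 0 hi]
      exact List.getElem_mem hi
    have hcast : ∀ i, i < perm.length → ((pvPm perm i : Nat) : Int) = perm.getD i 0 := by
      intro i hi
      exact Int.toNat_of_nonneg (hr _ (hmem i hi)).1
    have hlt : ∀ i, i < perm.length → pvPm perm i < perm.length := by
      intro i hi
      have h2 := (hr _ (hmem i hi)).2
      have h3 := hcast i hi
      omega
    have hinj : ∀ i, i < perm.length → ∀ j, j < perm.length → pvPm perm i = pvPm perm j → i = j := by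
      intro i hi j hj hpm
      have e : perm.getD i 0 = perm.getD j 0 := by
        rw [← hcast i hi, ← hcast j hj, hpm]
      rw [List.getD_eq_getElem perm 0 hi, List.getD_eq_getElem perm 0 hj] at e
      exact (List.Nodup.getElem_inj_iff nodup).mp e
    have hpg : ∀ i, i < perm.length → PySem.List.pyGetD perm (↑i) 0 = ((pvPm perm i : Nat) : Int) := by
      intro i hi
      rw [PySem.List.pyGetD_natCast, hcast i hi]
    simp only [preserves_adjacency_py, preserves_adjacency_py_alt]
    rw [if_neg hguard, if_neg (fun h => h heqs)]
    rw [Bool.eq_iff_iff]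
    have hmemL : ∀ x : Int × Int,
        (x ∈ (PySem.List.pyRange 0 ((perm.length : Nat) : Int) 1).flatMap (fun i =>
          ((PySem.List.pyRange 0 ((perm.length : Nat) : Int) 1).filter (fun j =>
            PySem.List.pyGetD (PySem.List.pyGetD adj_matrix i []) j false)).map (fun j => (i, j)))) ↔
        ∃ i, i < perm.length ∧ ∃ j, j < perm.length ∧ pvG adj_matrix i j = true ∧ x = (↑i, ↑j) := by
      intro x
      rw [PySem.List.pyRange_zero_natCast]
      simp only [List.mem_flatMap, List.mem_map, List.mem_filter, List.mem_range]
      constructor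
      · rintro ⟨a, ⟨i, hi, rfl⟩, j', ⟨⟨⟨j, hj, rfl⟩, hgj⟩, rfl⟩⟩
        refine ⟨i, hi, j, hj, ?_, rfl⟩
        simpa [pvG, PySem.List.pyGetD_natCast] using hgj
      · rintro ⟨i, hi, j, hj, hg, rfl⟩
        exact ⟨↑i, ⟨i, hi, rfl⟩, ↑j, ⟨⟨j, hj, rfl⟩,
          by simpa [pvG, PySem.List.pyGetD_natCast] using hg⟩, rfl⟩
    have hA : ((PySem.List.pyRange 0 ((perm.length : Nat) : Int) 1).all (fun i =>
        (PySem.List.pyRange 0 ((perm.length : Nat) : Int) 1).all (fun j =>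
          PySem.List.pyGetD (PySem.List.pyGetD adj_matrix i []) j false ==
          PySem.List.pyGetD (PySem.List.pyGetD adj_matrix (PySem.List.pyGetD perm i 0) [])
            (PySem.List.pyGetD perm j 0) false)) = true) ↔
        (∀ i, i < perm.length → ∀ j, j < perm.length →
          pvG adj_matrix i j = pvG adj_matrix (pvPm perm i) (pvPm perm j)) := by
      rw [all_pyRange_iff]
      refine forall_congr' fun i => imp_congr_right fun hi => ?_
      rw [all_pyRange_iff]
      refine forall_congr' fun j => imp_congr_right fun hj => ?_
      rw [hpg i hi, hpg j hj]
      simp only [PySem.List.pyGetD_natCast, beq_iff_eq]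
      exact Iff.rfl
    have hB : (((PySem.Set.ofList ((PySem.List.pyRange 0 ((perm.length : Nat) : Int) 1).flatMap (fun i =>
          ((PySem.List.pyRange 0 ((perm.length : Nat) : Int) 1).filter (fun j =>
            PySem.List.pyGetD (PySem.List.pyGetD adj_matrix i []) j false)).map (fun j => (i, j))))).all
          (fun e => PySem.Set.contains
            (PySem.Set.ofList ((PySem.List.pyRange 0 ((perm.length : Nat) : Int) 1).flatMap (fun i =>
              ((PySem.List.pyRange 0 ((perm.length : Nat) : Int) 1).filter (fun j =>
                PySem.List.pyGetD (PySem.List.pyGetD adj_matrix i []) j false)).map (fun j => (i, j)))))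
            (PySem.List.pyGetD perm e.1 0, PySem.List.pyGetD perm e.2 0))) = true) ↔
        (∀ i, i < perm.length → ∀ j, j < perm.length →
          pvG adj_matrix i j = true → pvG adj_matrix (pvPm perm i) (pvPm perm j) = true) := by
      refine Iff.trans (set_all_closed_iff
        ((PySem.List.pyRange 0 ((perm.length : Nat) : Int) 1).flatMap (fun i =>
          ((PySem.List.pyRange 0 ((perm.length : Nat) : Int) 1).filter (fun j =>
            PySem.List.pyGetD (PySem.List.pyGetD adj_matrix i []) j false)).map (fun j => (i, j))))
        (fun e => (PySem.List.pyGetD perm e.1 0, PySem.List.pyGetD perm e.2 0))) ?_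
      constructor
      · intro h i hi j hj hg
        have h2 := h _ ((hmemL _).mpr ⟨i, hi, j, hj, hg, rfl⟩)
        obtain ⟨a, ha, b, hb, hgab, heq⟩ := (hmemL _).mp h2
        dsimp only at heq
        rw [hpg i hi, hpg j hj, Prod.mk.injEq] at heq
        have ea : pvPm perm i = a := by exact_mod_cast heq.1
        have eb : pvPm perm j = b := by exact_mod_cast heq.2
        rw [ea, eb]; exact hgab
      · intro h e he
        obtain ⟨i, hi, j, hj, hg, rfl⟩ := (hmemL _).mp he
        refine (hmemL _).mpr ⟨pvPm perm i, hlt i hi, pvPm perm j, hlt j hj, h i hi j hj hg, ?_⟩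
        dsimp only
        rw [hpg i hi, hpg j hj]
    rw [hA, hB]
    exact (closure_iff perm.length (pvG adj_matrix) (pvPm perm) hlt hinj).symm

-- ===== VERDICT (by name: the statement is the Claim_ definition above) =====
theorem preserves_adjacency_py_spec : Claim_equal_preserves_adjacency_py := by
  intro perm adj _ _
  unfold Spec_preserves_adjacency_py
  exact main_eq perm adj
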